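-- pv_equiv track=rewrite | github.com/creditimpact/finance-project-2-0 | backend/frontend/packs/generator.py | _resolve_account_number_consensus
-- ===== SOURCE A (Python) =====
-- from collections import Counter
-- from typing import Any, Callable, Iterable, Mapping, Sequence
--
-- _BUREAU_ORDER: tuple[str, ...] = ("transunion", "experian", "equifax")
--
-- def _resolve_account_number_consensus(per_bureau: Mapping[str, str]) -> str:
--     duplicates = set()
--     ordered_values: list[str] = []
--     for bureau in _BUREAU_ORDER:
--         value = per_bureau.get(bureau)
--         if value and value != "--":
--             ordered_values.append(value)
--     if not ordered_values:
--         return "--"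
--     counts = Counter(ordered_values)
--     duplicates = {value for value, count in counts.items() if count >= 2}
--     if duplicates:
--         for bureau in _BUREAU_ORDER:
--             value = per_bureau.get(bureau)
--             if value in duplicates:
--                 return value
--     for bureau in _BUREAU_ORDER:
--         value = per_bureau.get(bureau)
--         if value and value != "--":
--             return value
--     return "--"
-- ===== SOURCE B (Python) =====
-- from collections import Counter
--
-- _BUREAU_ORDER: tuple[str, ...] = ("transunion", "experian", "equifax")
--
-- def _resolve_account_number_consensus(per_bureau):
--     counts = Counter(
--         v
--         for b in _BUREAU_ORDER
--         for v in [per_bureau.get(b)]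
--         if v and v != "--"
--     )
--     if not counts:
--         return "--"
--     best = max(counts.values())
--     for bureau in _BUREAU_ORDER:
--         value = per_bureau.get(bureau)
--         if value and value != "--" and counts[value] == best:
--             return value
--     return "--"
-- ===== Notes on version B (the rewrite author's own statement) =====
-- stated objective: simpler
-- what changed: B drops A's duplicate-set construction and its two separate fallback loops: it builds one Counter of the valid bureau values, takes the maximum count, and returns the first bureau (in bureau order) whose valid value attains that count (with three slots the highest-count valid value is exactly the consensus, and bureau order reproduces A's tie-break).
import Mathlib
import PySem

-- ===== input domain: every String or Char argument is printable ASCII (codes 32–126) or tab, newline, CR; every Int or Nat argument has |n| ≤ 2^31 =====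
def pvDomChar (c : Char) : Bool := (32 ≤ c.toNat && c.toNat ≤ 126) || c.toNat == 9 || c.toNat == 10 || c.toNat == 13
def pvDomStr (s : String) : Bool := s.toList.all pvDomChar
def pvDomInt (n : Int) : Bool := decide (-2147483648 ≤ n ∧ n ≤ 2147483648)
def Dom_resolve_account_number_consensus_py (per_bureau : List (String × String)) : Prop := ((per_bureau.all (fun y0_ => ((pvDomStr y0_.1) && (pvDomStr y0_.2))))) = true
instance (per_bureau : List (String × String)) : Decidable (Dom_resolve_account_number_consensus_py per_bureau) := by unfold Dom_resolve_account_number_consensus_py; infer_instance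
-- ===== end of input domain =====

-- B replaces A's duplicate-set plus two fallback loops by one max-count and a single selection loop (objective: simpler).

-- ===== PORT A =====
def pvBureauOrder : List String := ["transunion", "experian", "equifax"]

def pvGet (per_bureau : List (String × String)) (bureau : String) : Option String :=
  (PySem.Dict.mk per_bureau).get? bureau

def resolve_account_number_consensus_py (per_bureau : List (String × String)) : String :=
  let ordered_values : List String := pvBureauOrder.foldl (fun acc bureau =>
    match pvGet per_bureau bureau with
    | some v => if v ≠ "" ∧ v ≠ "--" then acc ++ [v] else acc
    | none => acc) []
  if ordered_values = [] then "--"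
  else
    let counts := PySem.Dict.counter ordered_values
    let duplicates : PySem.Set String :=
      PySem.Set.ofList ((counts.items.filter (fun p => p.2 ≥ 2)).map Prod.fst)
    let r1 : Option String :=
      if duplicates ≠ [] then
        pvBureauOrder.findSome? (fun bureau =>
          match pvGet per_bureau bureau with
          | some v => if v ∈ duplicates then some v else none
          | none => none)
      else none
    match r1 with
    | some v => v
    | none =>
      match pvBureauOrder.findSome? (fun bureau =>
        match pvGet per_bureau bureau with
        | some v => if v ≠ "" ∧ v ≠ "--" then some v else none
        | none => none) with
      | some v => v
      | none => "--"

-- ===== PORT B =====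
def resolve_account_number_consensus_py_alt (per_bureau : List (String × String)) : String :=
  let counts := PySem.Dict.counter (pvBureauOrder.filterMap (fun b =>
    match pvGet per_bureau b with
    | some v => if v ≠ "" ∧ v ≠ "--" then some v else none
    | none => none))
  if counts.items = [] then "--"
  else
    let best := (PySem.List.max? counts.values (fun x => x)).getD 0
    match pvBureauOrder.findSome? (fun b =>
      match pvGet per_bureau b with
      | some v => if (v ≠ "" ∧ v ≠ "--") ∧ counts.getD v 0 = best then some v else none
      | none => none) with
    | some v => v
    | none => "--"

-- ===== PRECONDITION & SPEC =====
def Spec_resolve_account_number_consensus_py (per_bureau : List (String × String)) (out : String) : Prop := out = resolve_account_number_consensus_py_alt per_bureau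
instance (per_bureau : List (String × String)) (out : String) : Decidable (Spec_resolve_account_number_consensus_py per_bureau out) := by unfold Spec_resolve_account_number_consensus_py; infer_instance

-- ===== CLAIM (what is proved, stated in full; the proofs are below) =====
def Claim_equal_resolve_account_number_consensus_py : Prop := ∀ (per_bureau : List (String × String)), Dom_resolve_account_number_consensus_py per_bureau → Spec_resolve_account_number_consensus_py per_bureau (resolve_account_number_consensus_py per_bureau)

-- ===== LEMMAS AND PROOFS =====
-- pvA/pvB: the two ports re-expressed as functions of the three bureau lookups (definitional equality).
def pvA (a b c : Option String) : String :=
  let ordered_values : List String := [a, b, c].foldl (fun acc o =>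
    match o with
    | some v => if v ≠ "" ∧ v ≠ "--" then acc ++ [v] else acc
    | none => acc) []
  if ordered_values = [] then "--"
  else
    let counts := PySem.Dict.counter ordered_values
    let duplicates : PySem.Set String :=
      PySem.Set.ofList ((counts.items.filter (fun p => p.2 ≥ 2)).map Prod.fst)
    let r1 : Option String :=
      if duplicates ≠ [] then
        [a, b, c].findSome? (fun o =>
          match o with
          | some v => if v ∈ duplicates then some v else none
          | none => none)
      else none
    match r1 with
    | some v => v
    | none =>
      match [a, b, c].findSome? (fun o =>
        match o with
        | some v => if v ≠ "" ∧ v ≠ "--" then some v else none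
        | none => none) with
      | some v => v
      | none => "--"

def pvB (a b c : Option String) : String :=
  let counts := PySem.Dict.counter ([a, b, c].filterMap (fun o =>
    match o with
    | some v => if v ≠ "" ∧ v ≠ "--" then some v else none
    | none => none))
  if counts.items = [] then "--"
  else
    let best := (PySem.List.max? counts.values (fun x => x)).getD 0
    match [a, b, c].findSome? (fun o =>
      match o with
      | some v => if (v ≠ "" ∧ v ≠ "--") ∧ counts.getD v 0 = best then some v else none
      | none => none) with
    | some v => v
    | none => "--"

set_option maxHeartbeats 16000000 in
theorem core (a b c : Option String) : pvA a b c = pvB a b c := by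
  rcases a with _ | x <;> rcases b with _ | y <;> rcases c with _ | z <;>
    (try by_cases hx1 : x = "") <;> (try subst hx1) <;>
    (try by_cases hx2 : x = "--") <;> (try subst hx2) <;>
    (try by_cases hy1 : y = "") <;> (try subst hy1) <;>
    (try by_cases hy2 : y = "--") <;> (try subst hy2) <;>
    (try by_cases hz1 : z = "") <;> (try subst hz1) <;>
    (try by_cases hz2 : z = "--") <;> (try subst hz2) <;>
    (try by_cases hxy : x = y) <;>
    (try by_cases hxz : x = z) <;>
    (try by_cases hyz : y = z) <;>
    (try have hx1b : "" ≠ x := Ne.symm hx1) <;>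
    (try have hx2b : "--" ≠ x := Ne.symm hx2) <;>
    (try have hy1b : "" ≠ y := Ne.symm hy1) <;>
    (try have hy2b : "--" ≠ y := Ne.symm hy2) <;>
    (try have hz1b : "" ≠ z := Ne.symm hz1) <;>
    (try have hz2b : "--" ≠ z := Ne.symm hz2) <;>
    (try have hxy2 : y ≠ x := Ne.symm hxy) <;>
    (try have hxz2 : z ≠ x := Ne.symm hxz) <;>
    (try have hyz2 : z ≠ y := Ne.symm hyz) <;>
    simp_all [pvA, pvB, beq_iff_eq,
        PySem.Dict.items_counter, PySem.Dict.getD_counter, PySem.Dict.values,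
        PySem.Set.ofList_cons, PySem.Set.ofList_nil,
        PySem.Set.discard, List.count_cons, PySem.List.max?_id_cons]

-- ===== VERDICT (by name: the statement is the Claim_ definition above) =====
theorem resolve_account_number_consensus_py_spec : Claim_equal_resolve_account_number_consensus_py := by
  intro pb _
  unfold Spec_resolve_account_number_consensus_py
  calc resolve_account_number_consensus_py pb
      = pvA (pvGet pb "transunion") (pvGet pb "experian") (pvGet pb "equifax") := rfl
    _ = pvB (pvGet pb "transunion") (pvGet pb "experian") (pvGet pb "equifax") := core _ _ _
    _ = resolve_account_number_consensus_py_alt pb := rfl
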